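-- pv_equiv track=rewrite | github.com/gabrielpc4/clone-hero-drum-and-levels-chartgen | src/songsterr_parsing/songsterr_import/writer.py | _yb_cymbals_to_thin_in_run_segment
-- ===== SOURCE A (Python) =====
-- def _yb_cymbals_to_thin_in_run_segment(
--     yb_only: list[tuple[int, int]],
--     has_virtual_at_start: bool,
-- ) -> set[tuple[int, int]]:
--     """
--     Só 98/99. Bursts de 2+ da *nova* cor: mantém todos, último revira a fase (virtual).
--     Paridade: com virtual, remove 0,2,4; sem, remove 1,3,5.
--     """
--     to_remove: set[tuple[int, int]] = set()
--     if len(yb_only) < 2: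
--         return to_remove
--
--     has_virtual = has_virtual_at_start
--     yb_index = 0
--     k = 0
--     while yb_index < len(yb_only):
--         t0, p0 = yb_only[yb_index]
--         if (
--             yb_index + 1 < len(yb_only)
--             and p0 == yb_only[yb_index + 1][1]
--             and yb_index > 0
--             and yb_only[yb_index - 1][1] != p0
--         ):
--             block_end = yb_index
--             while block_end < len(yb_only) and yb_only[block_end][1] == p0:
--                 block_end += 1
--             if block_end - yb_index >= 2:
--                 yb_index = block_end
--                 k = 0
--                 has_virtual = True
--                 continue
--         is_remove = (k % 2 == 0) if has_virtual else (k % 2 == 1)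
--         if is_remove:
--             to_remove.add((t0, p0))
--         yb_index += 1
--         k += 1
--     return to_remove
-- ===== SOURCE B (Python) =====
-- def _yb_cymbals_to_thin_in_run_segment(
--     yb_only: list[tuple[int, int]],
--     has_virtual_at_start: bool,
-- ) -> set[tuple[int, int]]:
--     to_remove: set[tuple[int, int]] = set()
--     if len(yb_only) < 2:
--         return to_remove
--     # Pass 1: group into maximal runs of equal parity.
--     runs: list[list[tuple[int, int]]] = []
--     cur: list[tuple[int, int]] = []
--     for tp in yb_only:
--         if cur and cur[-1][1] == tp[1]:
--             cur.append(tp)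
--         else:
--             if cur:
--                 runs.append(cur)
--             cur = [tp]
--     runs.append(cur)
--     # Pass 2: runs after the first of length >= 2 are blocks: skipped,
--     # parity counter reset, virtual flag set; everything else is walked
--     # with the parity rule.
--     k = 0
--     has_virtual = has_virtual_at_start
--     first = True
--     for run in runs:
--         if not first and len(run) >= 2:
--             k = 0
--             has_virtual = True
--         else:
--             for t, p in run:
--                 if (k % 2 == 0) if has_virtual else (k % 2 == 1):
--                     to_remove.add((t, p))
--                 k += 1
--         first = False
--     return to_remove
-- ===== Notes on version B (the rewrite author's own statement) =====
-- stated objective: alternative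
-- what changed: B replaces A's single index loop with look-back/look-ahead indexing and an inner rescanning while-loop by a two-pass decomposition: first group the list into maximal equal-parity runs, then fold over the runs, skipping every non-initial run of length >= 2 as a block and walking the rest with the parity counter.
import Mathlib
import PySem

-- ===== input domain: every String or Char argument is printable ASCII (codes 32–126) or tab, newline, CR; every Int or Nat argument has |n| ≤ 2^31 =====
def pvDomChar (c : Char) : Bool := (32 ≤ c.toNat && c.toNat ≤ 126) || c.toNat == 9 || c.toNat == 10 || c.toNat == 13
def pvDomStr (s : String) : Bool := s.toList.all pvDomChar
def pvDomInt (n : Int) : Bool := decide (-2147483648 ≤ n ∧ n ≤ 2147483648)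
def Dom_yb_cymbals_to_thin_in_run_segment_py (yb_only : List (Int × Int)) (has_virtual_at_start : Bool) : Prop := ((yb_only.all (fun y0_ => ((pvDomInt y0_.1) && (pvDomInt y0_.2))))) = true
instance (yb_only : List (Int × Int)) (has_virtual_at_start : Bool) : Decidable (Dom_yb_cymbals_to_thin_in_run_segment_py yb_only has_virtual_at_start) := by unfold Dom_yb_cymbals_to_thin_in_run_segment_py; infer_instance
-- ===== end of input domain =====

-- B replaces A's index loop (look-back/look-ahead indexing plus an inner rescanning
-- while) by a two-pass decomposition: group into maximal equal-parity runs, then fold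
-- over the runs (objective: alternative; same O(n) cost).

-- ===== PORT A =====
-- inner `while block_end < len and yb_only[block_end][1] == p0` loop of A
def pvBlockEnd (l : List (Int × Int)) (be : Nat) (p0 : Int) : Nat :=
  if h : be < l.length ∧ (l.getD be (0, 0)).2 = p0 then pvBlockEnd l (be + 1) p0 else be
  termination_by l.length - be
  decreasing_by omega

-- A's main `while yb_index < len(yb_only)` loop (the duplicated normal step renders
-- Python's fall-through after the `if block_end - yb_index >= 2` test / `continue`)
def pvLoopA (l : List (Int × Int)) (i k : Nat) (hv : Bool)
    (acc : PySem.Set (Int × Int)) : PySem.Set (Int × Int) :=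
  if h : i < l.length then
    if hc : i + 1 < l.length ∧ (l.getD (i + 1) (0, 0)).2 = (l.getD i (0, 0)).2 ∧ 0 < i ∧
        (l.getD (i - 1) (0, 0)).2 ≠ (l.getD i (0, 0)).2 then
      if hb : 2 ≤ pvBlockEnd l i ((l.getD i (0, 0)).2) - i then
        pvLoopA l (pvBlockEnd l i ((l.getD i (0, 0)).2)) 0 true acc
      else
        pvLoopA l (i + 1) (k + 1) hv
          (if (if hv then k % 2 = 0 else k % 2 = 1) then PySem.Set.add acc ((l.getD i (0, 0)).1, (l.getD i (0, 0)).2) else acc)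
    else
      pvLoopA l (i + 1) (k + 1) hv
        (if (if hv then k % 2 = 0 else k % 2 = 1) then PySem.Set.add acc ((l.getD i (0, 0)).1, (l.getD i (0, 0)).2) else acc)
  else acc
  termination_by l.length - i
  decreasing_by all_goals omega

def yb_cymbals_to_thin_in_run_segment_py (yb_only : List (Int × Int)) (has_virtual_at_start : Bool) : List (Int × Int) :=
  if yb_only.length < 2 then PySem.Set.empty
  else pvLoopA yb_only 0 0 has_virtual_at_start PySem.Set.empty

-- ===== PORT B =====
-- pass 1 of Source B: one step of the grouping loop (state = (runs, cur))
def pvGroupStep (s : List (List (Int × Int)) × List (Int × Int)) (tp : Int × Int) :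
    List (List (Int × Int)) × List (Int × Int) :=
  if s.2 ≠ [] ∧ ((s.2.getLast?).getD (0, 0)).2 = tp.2 then (s.1, s.2 ++ [tp])
  else ((if s.2 ≠ [] then s.1 ++ [s.2] else s.1), [tp])

def pvRuns (l : List (Int × Int)) : List (List (Int × Int)) :=
  let s := l.foldl pvGroupStep ([], [])
  s.1 ++ [s.2]

-- pass 2 of Source B: one step of the `for run in runs` loop (state = (k, hv, first, out))
def pvStepRun (s : Nat × Bool × Bool × PySem.Set (Int × Int)) (run : List (Int × Int)) :
    Nat × Bool × Bool × PySem.Set (Int × Int) :=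
  if s.2.2.1 = false ∧ 2 ≤ run.length then (0, true, false, s.2.2.2)
  else
    let r := run.foldl
      (fun (q : Nat × PySem.Set (Int × Int)) tp =>
        (q.1 + 1, if (if s.2.1 then q.1 % 2 = 0 else q.1 % 2 = 1) then PySem.Set.add q.2 tp else q.2))
      (s.1, s.2.2.2)
    (r.1, s.2.1, false, r.2)

def yb_cymbals_to_thin_in_run_segment_py_alt (yb_only : List (Int × Int)) (has_virtual_at_start : Bool) : List (Int × Int) :=
  if yb_only.length < 2 then PySem.Set.empty
  else ((pvRuns yb_only).foldl pvStepRun (0, has_virtual_at_start, true, PySem.Set.empty)).2.2.2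

-- ===== PRECONDITION & SPEC =====
def Spec_yb_cymbals_to_thin_in_run_segment_py (yb_only : List (Int × Int)) (has_virtual_at_start : Bool) (out : List (Int × Int)) : Prop := out = yb_cymbals_to_thin_in_run_segment_py_alt yb_only has_virtual_at_start
instance (yb_only : List (Int × Int)) (has_virtual_at_start : Bool) (out : List (Int × Int)) : Decidable (Spec_yb_cymbals_to_thin_in_run_segment_py yb_only has_virtual_at_start out) := by unfold Spec_yb_cymbals_to_thin_in_run_segment_py; infer_instance

-- ===== CLAIM (what is proved, stated in full; the proofs are below) =====
def Claim_equal_yb_cymbals_to_thin_in_run_segment_py : Prop := ∀ (yb_only : List (Int × Int)) (has_virtual_at_start : Bool), Dom_yb_cymbals_to_thin_in_run_segment_py yb_only has_virtual_at_start → Spec_yb_cymbals_to_thin_in_run_segment_py yb_only has_virtual_at_start (yb_cymbals_to_thin_in_run_segment_py yb_only has_virtual_at_start)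

-- ===== LEMMAS AND PROOFS =====

-- common intermediate: the processing expressed as structural recursion on the suffix,
-- carrying the parity of the previous element
def pvCore (prev : Option Int) (l : List (Int × Int)) (k : Nat) (hv : Bool)
    (acc : PySem.Set (Int × Int)) : PySem.Set (Int × Int) :=
  match l with
  | [] => acc
  | tp :: rest =>
    if prev ≠ none ∧ prev ≠ some tp.2 ∧ (rest.head?.map Prod.snd) = some tp.2 then
      pvCore (some tp.2) (rest.dropWhile (fun x => x.2 == tp.2)) 0 true acc
    else
      pvCore (some tp.2) rest (k + 1) hv
        (if (if hv then k % 2 = 0 else k % 2 = 1) then PySem.Set.add acc tp else acc)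
  termination_by l.length
  decreasing_by
    · exact Nat.lt_succ_of_le (List.length_dropWhile_le _ _)
    · simp

def pvPrevOf (l : List (Int × Int)) (i : Nat) : Option Int :=
  if i = 0 then none else some ((l.getD (i - 1) (0, 0)).2)

theorem pvBlockEnd_spec (l : List (Int × Int)) (j : Nat) (p0 : Int) :
    pvBlockEnd l j p0 = j + ((l.drop j).takeWhile (fun x => x.2 == p0)).length := by
  induction j using pvBlockEnd.induct (l := l) (p0 := p0) with
  | case1 j h ih =>
    rw [pvBlockEnd, dif_pos h]
    rw [List.drop_eq_getElem_cons h.1]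
    have hg : l.getD j (0, 0) = l[j] := List.getD_eq_getElem l (0,0) h.1
    rw [List.takeWhile_cons]
    simp only [← hg, h.2, beq_self_eq_true, if_true, List.length_cons]
    omega
  | case2 j h =>
    rw [pvBlockEnd, dif_neg h]
    by_cases hj : j < l.length
    · have h2 : ¬ (l.getD j (0, 0)).2 = p0 := fun hp => h ⟨hj, hp⟩
      rw [List.drop_eq_getElem_cons hj, List.takeWhile_cons]
      have hg : l.getD j (0, 0) = l[j] := List.getD_eq_getElem l (0,0) hj
      have hb : ((l[j]).2 == p0) = false := by
        rw [← hg]; exact beq_eq_false_iff_ne.2 h2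
      simp [hb]
    · rw [List.drop_eq_nil_of_le (by omega)]
      simp

theorem pvDropWhile_eq_drop (p : (Int × Int) → Bool) (l : List (Int × Int)) :
    l.dropWhile p = l.drop (l.takeWhile p).length := by
  induction l with
  | nil => rfl
  | cons a as ih =>
    rw [List.dropWhile_cons, List.takeWhile_cons]
    by_cases h : p a <;> simp [h, ih]

-- the port's guard, translated to the suffix form used by pvCore
theorem pvCond_iff (l : List (Int × Int)) (i : Nat) (h : i < l.length) :
    (pvPrevOf l i ≠ none ∧ pvPrevOf l i ≠ some ((l[i]).2) ∧
        (((l.drop (i + 1)).head?).map Prod.snd) = some ((l[i]).2))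
    ↔ (i + 1 < l.length ∧ (l.getD (i + 1) (0, 0)).2 = (l.getD i (0, 0)).2 ∧ 0 < i ∧
        (l.getD (i - 1) (0, 0)).2 ≠ (l.getD i (0, 0)).2) := by
  have hg : l.getD i (0, 0) = l[i] := List.getD_eq_getElem l _ h
  unfold pvPrevOf
  rw [List.head?_drop]
  constructor
  · rintro ⟨h1, h2, h3⟩
    have hi0 : ¬ i = 0 := by intro hh; rw [if_pos hh] at h1; exact h1 rfl
    rw [if_neg hi0] at h2
    rcases hx : l[i + 1]? with _ | q
    · rw [hx] at h3; simp at h3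
    · rw [hx] at h3
      simp only [Option.map_some, Option.some.injEq] at h3
      obtain ⟨hlt, hq⟩ := List.getElem?_eq_some_iff.1 hx
      have hg1 : l.getD (i + 1) (0, 0) = l[i + 1] := List.getD_eq_getElem l _ hlt
      refine ⟨hlt, ?_, Nat.pos_of_ne_zero hi0, ?_⟩
      · rw [hg1, hg, hq, h3]
      · rw [hg]; exact fun hh => h2 (by rw [hh])
  · rintro ⟨h1, h2, h3, h4⟩
    have hi0 : ¬ i = 0 := Nat.pos_iff_ne_zero.1 h3
    have hg1 : l.getD (i + 1) (0, 0) = l[i + 1] := List.getD_eq_getElem l _ h1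
    refine ⟨by rw [if_neg hi0]; simp, ?_, ?_⟩
    · rw [if_neg hi0]
      intro hh
      exact h4 (by rw [hg]; exact Option.some.inj hh)
    · rw [List.getElem?_eq_getElem h1]
      simp only [Option.map_some, Option.some.injEq]
      rw [← hg1, ← hg]; exact h2

theorem pvLoopA_eq_core (l : List (Int × Int)) (i k : Nat) (hv : Bool) (acc : PySem.Set (Int × Int)) :
    pvLoopA l i k hv acc = pvCore (pvPrevOf l i) (l.drop i) k hv acc := by
  induction i, k, hv, acc using pvLoopA.induct (l := l) with
  | case1 i k hv acc h hc hb ih =>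
    -- block branch
    have hg : l.getD i (0, 0) = l[i] := List.getD_eq_getElem l _ h
    rw [pvLoopA, dif_pos h, dif_pos hc, dif_pos hb, ih]
    rw [List.drop_eq_getElem_cons h, pvCore, if_pos ((pvCond_iff l i h).2 hc)]
    -- abbreviations
    have hspec := pvBlockEnd_spec l i ((l.getD i (0, 0)).2)
    have hdropi : l.drop i = l[i] :: l.drop (i + 1) := List.drop_eq_getElem_cons h
    have htw : (l.drop i).takeWhile (fun x => x.2 == (l.getD i (0, 0)).2)
        = l[i] :: ((l.drop (i + 1)).takeWhile (fun x => x.2 == (l.getD i (0, 0)).2)) := by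
      rw [hdropi, List.takeWhile_cons, if_pos (by rw [hg]; exact beq_self_eq_true _)]
    set T' := ((l.drop (i + 1)).takeWhile (fun x => x.2 == (l.getD i (0, 0)).2)).length with hT'
    have hbe : pvBlockEnd l i ((l.getD i (0, 0)).2) = i + 1 + T' := by
      rw [hspec, htw]; simp only [List.length_cons]; omega
    have hT'le : T' ≤ l.length - (i + 1) := by
      have := (List.takeWhile_prefix (l := l.drop (i + 1))
        (p := fun x => x.2 == (l.getD i (0, 0)).2)).length_le
      rw [← hT'] at this
      simpa using this
    -- the two suffixes agree
    have hdrop2 : l.drop (pvBlockEnd l i ((l.getD i (0, 0)).2))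
        = (l.drop (i + 1)).dropWhile (fun x => x.2 == l[i].2) := by
      rw [hbe, pvDropWhile_eq_drop, ← List.drop_drop, ← hg]
    -- the previous element at the restart has the block's parity
    have hprevbe : pvPrevOf l (pvBlockEnd l i ((l.getD i (0, 0)).2)) = some (l[i].2) := by
      unfold pvPrevOf
      rw [hbe, if_neg (by omega)]
      congr 1
      have hlt : i + T' < l.length := by omega
      have hgb : l.getD (i + 1 + T' - 1) (0, 0) = l[i + T'] := by
        have : i + 1 + T' - 1 = i + T' := by omega
        rw [this]; exact List.getD_eq_getElem l _ hlt
      rw [hgb]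
      -- l[i + T'] is inside the takeWhile run of l.drop i
      have hlen : T' < ((l.drop i).takeWhile (fun x => x.2 == (l.getD i (0, 0)).2)).length := by
        rw [htw]; simp only [List.length_cons]; omega
      have hmem : ((l.drop i).takeWhile (fun x => x.2 == (l.getD i (0, 0)).2))[T']'hlen
          ∈ (l.drop i).takeWhile (fun x => x.2 == (l.getD i (0, 0)).2) := List.getElem_mem _
      have hpred := List.mem_takeWhile_imp hmem
      have heq1 : ((l.drop i).takeWhile (fun x => x.2 == (l.getD i (0, 0)).2))[T']'hlen
          = (l.drop i)[T']'(lt_of_lt_of_le hlen (List.takeWhile_prefix _).length_le) :=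
        (List.takeWhile_prefix _).getElem hlen
      have heq2 : (l.drop i)[T']'(lt_of_lt_of_le hlen (List.takeWhile_prefix _).length_le)
          = l[i + T']'(by omega) := List.getElem_drop ..
      rw [heq1, heq2] at hpred
      rw [hg] at hpred
      exact beq_iff_eq.1 hpred
    rw [hdrop2, hprevbe]
  | case2 i k hv acc h hc hb ih =>
    -- unreachable: the guard guarantees a block of length ≥ 2
    exfalso
    have hg : l.getD i (0, 0) = l[i] := List.getD_eq_getElem l _ h
    obtain ⟨h1, h2, -, -⟩ := hc
    have hg1 : l.getD (i + 1) (0, 0) = l[i + 1] := List.getD_eq_getElem l _ h1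
    have hdropi : l.drop i = l[i] :: l[i + 1] :: l.drop (i + 2) := by
      rw [List.drop_eq_getElem_cons h, List.drop_eq_getElem_cons h1]
    have hspec := pvBlockEnd_spec l i ((l.getD i (0, 0)).2)
    rw [hdropi, List.takeWhile_cons, if_pos (by rw [hg]; exact beq_self_eq_true _),
      List.takeWhile_cons, if_pos (by rw [← hg1, h2]; exact beq_self_eq_true _)] at hspec
    simp only [List.length_cons] at hspec
    omega
  | case3 i k hv acc h hc ih =>
    have hg : l.getD i (0, 0) = l[i] := List.getD_eq_getElem l _ h
    have hprev1 : pvPrevOf l (i + 1) = some (l[i].2) := by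
      unfold pvPrevOf
      rw [if_neg (by omega)]
      simp only [Nat.add_sub_cancel]
      rw [hg]
    rw [pvLoopA, dif_pos h, dif_neg hc]
    rw [List.drop_eq_getElem_cons h, pvCore,
      if_neg (fun hcc => hc ((pvCond_iff l i h).1 hcc)), ← hprev1, hg]
    rw [hg] at ih
    exact ih
  | case4 i k hv acc h =>
    rw [pvLoopA, dif_neg h, List.drop_eq_nil_of_le (by omega), pvCore]

-- -------- B side --------

def pvChunks : List (Int × Int) → List (List (Int × Int))
  | [] => []
  | tp :: rest =>
    match pvChunks rest with
    | [] => [[tp]]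
    | r :: rs => if ((r.headD (0, 0)).2 = tp.2) then (tp :: r) :: rs else [tp] :: r :: rs

-- proof-only helper: attach a pending group in front of an existing chunk list
def pvMerge (cur : List (Int × Int)) (chs : List (List (Int × Int))) : List (List (Int × Int)) :=
  match chs with
  | [] => [cur]
  | r :: rs =>
    if ((r.headD (0, 0)).2 = ((cur.getLast?).getD (0, 0)).2) then (cur ++ r) :: rs
    else cur :: r :: rs

theorem pvChunks_cons (tp : Int × Int) (rest : List (Int × Int)) :
    pvChunks (tp :: rest) = pvMerge [tp] (pvChunks rest) := by
  rw [pvChunks]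
  rcases pvChunks rest with _ | ⟨r, rs⟩ <;> simp [pvMerge]

theorem pvFoldGroup (xs : List (Int × Int)) :
    ∀ (runs : List (List (Int × Int))) (cur : List (Int × Int)), cur ≠ [] →
    (xs.foldl pvGroupStep (runs, cur)).1 ++ [(xs.foldl pvGroupStep (runs, cur)).2]
      = runs ++ pvMerge cur (pvChunks xs) := by
  induction xs with
  | nil => intro runs cur hcur; simp [pvChunks, pvMerge]
  | cons tp rest ih =>
    intro runs cur hcur
    simp only [List.foldl_cons]
    by_cases heq : ((cur.getLast?).getD (0, 0)).2 = tp.2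
    · have hstep : pvGroupStep (runs, cur) tp = (runs, cur ++ [tp]) := by
        unfold pvGroupStep; rw [if_pos ⟨hcur, heq⟩]
      rw [hstep, ih runs (cur ++ [tp]) (by simp)]
      congr 1
      rw [pvChunks_cons]
      rcases pvChunks rest with _ | ⟨r, rs⟩
      · simp [pvMerge, heq]
      · by_cases hpar : (r.head?.getD (0, 0)).2 = tp.2
        · simp [pvMerge, hpar, heq]
        · simp [pvMerge, hpar, heq]
    · have hne : ¬ (tp.2 = ((cur.getLast?).getD (0, 0)).2) := fun h => heq h.symm
      have hstep : pvGroupStep (runs, cur) tp = (runs ++ [cur], [tp]) := by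
        unfold pvGroupStep
        rw [if_neg (by rintro ⟨-, h⟩; exact heq h), if_pos hcur]
      rw [hstep, ih (runs ++ [cur]) [tp] (by simp), List.append_assoc]
      congr 1
      rw [pvChunks_cons]
      rcases pvChunks rest with _ | ⟨r, rs⟩
      · simp [pvMerge, hne]
      · by_cases hpar : (r.head?.getD (0, 0)).2 = tp.2
        · simp [pvMerge, hpar, hne]
        · simp [pvMerge, hpar, hne]

theorem pvRuns_eq_chunks (l : List (Int × Int)) (h : l ≠ []) : pvRuns l = pvChunks l := by
  rcases l with _ | ⟨tp, rest⟩
  · exact absurd rfl h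
  · show (((tp :: rest).foldl pvGroupStep ([], [])).1 ++ [((tp :: rest).foldl pvGroupStep ([], [])).2]) = _
    have hstep : pvGroupStep ([], []) tp = ([], [tp]) := by
      unfold pvGroupStep; rw [if_neg (by rintro ⟨h, -⟩; exact h rfl), if_neg (by simp)]
    simp only [List.foldl_cons, hstep]
    rw [pvFoldGroup rest [] [tp] (by simp), pvChunks_cons]
    rfl

def pvChunksOK : Option Int → List (List (Int × Int)) → Prop
  | _, [] => True
  | prev, r :: rs =>
    r ≠ [] ∧ (∀ x ∈ r, x.2 = (r.headD (0, 0)).2) ∧ prev ≠ some ((r.headD (0, 0)).2) ∧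
      pvChunksOK (some ((r.headD (0, 0)).2)) rs

-- every chunk is nonempty, of constant parity, and differs in parity from its predecessor
theorem pvChunks_ok_gen (l : List (Int × Int)) (prev : Option Int)
    (hp : ∀ tp, l.head? = some tp → prev ≠ some tp.2) : pvChunksOK prev (pvChunks l) := by
  induction l generalizing prev with
  | nil => trivial
  | cons tp rest ih =>
    have hprev : prev ≠ some tp.2 := hp tp (by rfl)
    have hok := ih none (by simp)
    rw [pvChunks]
    rcases hr : pvChunks rest with _ | ⟨r, rs⟩ <;> dsimp only
    · exact ⟨by simp, by simp, by simpa using hprev, trivial⟩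
    · rw [hr] at hok
      obtain ⟨hne, hconst, -, hrest⟩ := hok
      by_cases hpar : (r.headD (0, 0)).2 = tp.2
      · rw [if_pos hpar]
        refine ⟨by simp, ?_, by simpa using hprev, ?_⟩
        · intro x hx
          simp only [List.headD_cons]
          rcases List.mem_cons.1 hx with h | h
          · rw [h]
          · rw [hconst x h, hpar]
        · simpa only [List.headD_cons, hpar] using hrest
      · rw [if_neg hpar]
        exact ⟨by simp, by simp, by simpa using hprev,
          hne, hconst, fun hc => hpar (Option.some.inj hc).symm, hrest⟩

theorem pvChunks_ok (l : List (Int × Int)) : pvChunksOK none (pvChunks l) :=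
  pvChunks_ok_gen l none (by simp)

theorem pvChunks_flatten (l : List (Int × Int)) : (pvChunks l).flatten = l := by
  induction l with
  | nil => rfl
  | cons tp rest ih =>
    rw [pvChunks]
    rcases hr : pvChunks rest with _ | ⟨r, rs⟩ <;> dsimp only
    · rw [hr] at ih; simpa using ih.symm
    · rw [hr] at ih
      by_cases hpar : (r.headD (0, 0)).2 = tp.2
      · rw [if_pos hpar]; simp only [List.flatten_cons] at ih ⊢; simp [ih]
      · rw [if_neg hpar]; simp only [List.flatten_cons] at ih ⊢; simp [ih]

theorem pvFlatten_head_ne (rs : List (List (Int × Int))) (p : Int) (hok : pvChunksOK (some p) rs) :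
    ∀ q, rs.flatten.head? = some q → q.2 ≠ p := by
  rcases rs with _ | ⟨r, rs'⟩
  · simp
  · obtain ⟨hne, -, hprev, -⟩ := hok
    rcases r with _ | ⟨c, cs⟩
    · exact absurd rfl hne
    · intro q hq
      simp only [List.flatten_cons, List.cons_append, List.head?_cons, Option.some.injEq] at hq
      subst hq
      intro hc
      exact hprev (by simp [hc])

theorem pvDropWhile_flatten (rs : List (List (Int × Int))) (p : Int)
    (hok : pvChunksOK (some p) rs) :
    rs.flatten.dropWhile (fun x => x.2 == p) = rs.flatten := by
  rcases hfl : rs.flatten with _ | ⟨q, qs⟩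
  · simp
  · have hq := pvFlatten_head_ne rs p hok q (by rw [hfl]; rfl)
    rw [List.dropWhile_cons]
    simp [hq]

-- processing one constant-parity segment element by element
theorem pvCore_run (run : List (Int × Int)) (p : Int) :
    ∀ (prev : Option Int) (tail : List (Int × Int)) (k : Nat) (hv : Bool)
      (acc : PySem.Set (Int × Int)),
    run ≠ [] → (∀ x ∈ run, x.2 = p) →
    (prev = none ∨ prev = some p ∨ ((∀ q, tail.head? = some q → q.2 ≠ p) ∧ run.length = 1)) →
    pvCore prev (run ++ tail) k hv acc =
      pvCore (some p) tail
        ((run.foldl (fun (q : Nat × PySem.Set (Int × Int)) tp =>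
          (q.1 + 1, if (if hv then q.1 % 2 = 0 else q.1 % 2 = 1) then PySem.Set.add q.2 tp else q.2)) (k, acc)).1)
        hv
        ((run.foldl (fun (q : Nat × PySem.Set (Int × Int)) tp =>
          (q.1 + 1, if (if hv then q.1 % 2 = 0 else q.1 % 2 = 1) then PySem.Set.add q.2 tp else q.2)) (k, acc)).2) := by
  induction run with
  | nil => intro _ _ _ _ _ hne _ _; exact absurd rfl hne
  | cons a as ih =>
    intro prev tail k hv acc _ hconst hdisj
    have ha : a.2 = p := hconst a List.mem_cons_self
    have hcond : ¬ (prev ≠ none ∧ prev ≠ some a.2 ∧ (((as ++ tail).head?).map Prod.snd) = some a.2) := by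
      rcases hdisj with h | h | ⟨htail, hlen⟩
      · subst h; rintro ⟨h1, -, -⟩; exact h1 rfl
      · subst h; rw [ha]; rintro ⟨-, h2, -⟩; exact h2 rfl
      · have has : as = [] := by
          rcases as with _ | _
          · rfl
          · simp at hlen
        subst has
        rintro ⟨-, -, h3⟩
        rcases htl : tail.head? with _ | q
        · simp [htl] at h3
        · rw [List.nil_append, htl] at h3
          simp only [Option.map_some, Option.some.injEq] at h3
          exact htail q htl (by rw [h3, ha])
    rcases as with _ | ⟨b, t⟩
    · simp only [List.nil_append] at hcond
      rw [List.cons_append, List.nil_append, pvCore, if_neg hcond]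
      simp only [List.foldl_cons, List.foldl_nil, ha]
    · rw [List.cons_append, pvCore, if_neg hcond]
      rw [ha]
      rw [ih (some p) tail (k + 1) hv _ (by simp) (fun x hx => hconst x (List.mem_cons_of_mem a hx)) (Or.inr (Or.inl rfl))]
      simp only [List.foldl_cons]

theorem pvFold_eq_core (chs : List (List (Int × Int))) (prev : Option Int) (k : Nat) (hv : Bool)
    (acc : PySem.Set (Int × Int)) (hok : pvChunksOK prev chs) :
    (chs.foldl pvStepRun (k, hv, prev.isNone, acc)).2.2.2 = pvCore prev chs.flatten k hv acc := by
  induction chs generalizing prev k hv acc with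
  | nil => simp [pvCore]
  | cons r rs ih =>
    obtain ⟨hne, hconst, hprev, hrest⟩ := hok
    rcases r with _ | ⟨a, as⟩
    · exact absurd rfl hne
    simp only [List.headD_cons] at hconst hprev hrest
    simp only [List.foldl_cons, List.flatten_cons]
    by_cases hblock : prev.isNone = false ∧ 2 ≤ (a :: as).length
    · obtain ⟨hpn, hlen⟩ := hblock
      rcases as with _ | ⟨b, t⟩
      · simp at hlen
      rcases prev with _ | pq
      · simp at hpn
      have hstep : pvStepRun (k, hv, (some pq : Option Int).isNone, acc) (a :: b :: t)
          = (0, true, false, acc) := by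
        unfold pvStepRun
        rw [if_pos ⟨rfl, by simp⟩]
      rw [hstep]
      have hihs := ih (some a.2) 0 true acc hrest
      simp only [Option.isNone_some] at hihs
      rw [hihs]
      have hb : b.2 = a.2 := hconst b (by simp)
      rw [List.cons_append, pvCore, if_pos ?_]
      · rw [List.dropWhile_append]
        have hdw : ((b :: t).dropWhile (fun x => x.2 == a.2)) = [] := by
          rw [List.dropWhile_eq_nil_iff]
          intro x hx
          simp [hconst x (List.mem_cons_of_mem a hx)]
        rw [hdw]
        simp only [List.isEmpty_nil, if_true]
        rw [pvDropWhile_flatten rs a.2 hrest]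
      · refine ⟨by simp, by simpa using hprev, ?_⟩
        simp [hb]
    · have hstep : pvStepRun (k, hv, prev.isNone, acc) (a :: as)
          = (((a :: as).foldl (fun (q : Nat × PySem.Set (Int × Int)) tp =>
               (q.1 + 1, if (if hv then q.1 % 2 = 0 else q.1 % 2 = 1) then PySem.Set.add q.2 tp else q.2)) (k, acc)).1,
             hv, false,
             ((a :: as).foldl (fun (q : Nat × PySem.Set (Int × Int)) tp =>
               (q.1 + 1, if (if hv then q.1 % 2 = 0 else q.1 % 2 = 1) then PySem.Set.add q.2 tp else q.2)) (k, acc)).2) := by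
        unfold pvStepRun
        rw [if_neg hblock]
      rw [hstep]
      have hihs := ih (some a.2)
        (((a :: as).foldl (fun (q : Nat × PySem.Set (Int × Int)) tp =>
          (q.1 + 1, if (if hv then q.1 % 2 = 0 else q.1 % 2 = 1) then PySem.Set.add q.2 tp else q.2)) (k, acc)).1)
        hv
        (((a :: as).foldl (fun (q : Nat × PySem.Set (Int × Int)) tp =>
          (q.1 + 1, if (if hv then q.1 % 2 = 0 else q.1 % 2 = 1) then PySem.Set.add q.2 tp else q.2)) (k, acc)).2)
        hrest
      simp only [Option.isNone_some] at hihs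
      rw [hihs]
      rw [pvCore_run (a :: as) a.2 prev rs.flatten k hv acc (by simp) hconst ?_]
      rcases hpv : prev with _ | pq
      · exact Or.inl rfl
      · right; right
        have hlen : ¬ (2 ≤ (a :: as).length) := by
          intro h2
          exact hblock ⟨by rw [hpv]; rfl, h2⟩
        refine ⟨pvFlatten_head_ne rs a.2 hrest, by simpa using hlen⟩

-- ===== VERDICT (by name: the statement is the Claim_ definition above) =====
theorem yb_cymbals_to_thin_in_run_segment_py_spec : Claim_equal_yb_cymbals_to_thin_in_run_segment_py := by
  intro l hv _
  unfold Spec_yb_cymbals_to_thin_in_run_segment_py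
  unfold yb_cymbals_to_thin_in_run_segment_py yb_cymbals_to_thin_in_run_segment_py_alt
  by_cases h2 : l.length < 2
  · simp [h2]
  · have hne : l ≠ [] := by intro h; subst h; simp at h2
    simp only [if_neg h2]
    rw [pvLoopA_eq_core, pvRuns_eq_chunks l hne]
    have := pvFold_eq_core (pvChunks l) none 0 hv PySem.Set.empty (pvChunks_ok l)
    simp only [Option.isNone_none] at this
    rw [this, pvChunks_flatten]
    rfl
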